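-- pv_equiv track=rewrite | github.com/Rioskill/problem_graphica | main.py | get_probables
-- ===== SOURCE A (Python) =====
-- def get_probables(S):
--   def tobin(a, t):
--     res = bin(a)[2:]
--     return '0' * (t - len(res)) + res
--
--   codes = S.split()
--   blocked = list()
--   res = list()
--   l_max = len(max(codes, key=len))
--   for l in range(1, l_max + 1):
--     for i in range(2 ** l):
--       bn = tobin(i, l)
--       if bn in codes or bn[:-1] in blocked:
--         blocked.append(bn)
--       else:
--         res.append(bn)
--   return res
-- ===== SOURCE B (Python) =====
-- def get_probables(S):
--   def tobin(a, t):
--     res = bin(a)[2:]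
--     return '0' * (t - len(res)) + res
--
--   codes = S.split()
--   res = []
--   l_max = len(max(codes, key=len))
--   bincodes = []
--   for c in codes:
--     if c and all(ch in '01' for ch in c):
--       v = 0
--       for ch in c:
--         v = 2 * v + (ch == '1')
--       bincodes.append((len(c), v))
--   for l in range(1, l_max + 1):
--     blocked = set()
--     for k, v in bincodes:
--       if k <= l:
--         blocked.update(range(v << (l - k), (v + 1) << (l - k)))
--     for i in range(2 ** l):
--       if i not in blocked:
--         res.append(tobin(i, l))
--   return res
-- ===== Notes on version B (the rewrite author's own statement) =====
-- stated objective: alternative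
-- what changed: Drops A's propagated blocked-list (whose 'bn[:-1] in blocked' test scans a list that grows with 2^l) and instead computes, per length l, the set of blocked indices numerically: every binary code of length k <= l blocks exactly the index range [v << (l-k), (v+1) << (l-k)); a string is emitted iff its index is outside that set.
import Mathlib
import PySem

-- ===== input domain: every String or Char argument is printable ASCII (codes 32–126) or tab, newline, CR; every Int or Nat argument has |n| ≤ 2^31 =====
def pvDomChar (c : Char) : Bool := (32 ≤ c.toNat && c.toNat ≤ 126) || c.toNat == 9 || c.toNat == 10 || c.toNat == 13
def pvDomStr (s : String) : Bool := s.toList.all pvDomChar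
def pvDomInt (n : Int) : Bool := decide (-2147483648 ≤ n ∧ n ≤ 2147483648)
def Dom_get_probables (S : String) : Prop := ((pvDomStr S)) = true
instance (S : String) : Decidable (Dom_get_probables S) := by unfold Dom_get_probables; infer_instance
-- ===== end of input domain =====

-- B replaces A's propagated blocked-list by a per-length set of blocked indices computed
-- numerically from the codes (objective: alternative algorithm, same generation order).

-- ===== PORT A =====
-- tobin(a, t) = '0' * (t - len(bin(a)[2:])) + bin(a)[2:]  (on List Char; bin(a)[2:] for a ≥ 0 is PySem.Int.toBinChars)
def pvTobin (a t : Nat) : List Char :=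
  let res := PySem.Int.toBinChars (a : Int)
  List.replicate (t - res.length) '0' ++ res

-- strings are carried as List Char (PySem.Str.* are thin wrappers over toList); bn[:-1] on a
-- char list is List.dropLast (exact, also for the empty list); 'for l in range(1, l_max+1)'
-- is the fold over List.range l_max with l = l0+1 (all loop values are nonnegative).
def get_probables (S : String) : List String :=
  let codes := (PySem.Str.split₀ S).map String.toList
  match PySem.List.max? codes (fun c => c.length) with
  | none => []  -- Python: max() raises ValueError on empty codes; excluded by Pre_
  | some m =>
    let st :=
      (List.range m.length).foldl (fun st l0 =>
        (List.range (2 ^ (l0 + 1))).foldl (fun st i =>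
          let bn := pvTobin i (l0 + 1)
          if codes.contains bn || st.1.contains bn.dropLast then
            (st.1 ++ [bn], st.2)
          else
            (st.1, st.2 ++ [bn])) st)
        (([], []) : List (List Char) × List (List Char))
    st.2.map String.ofList

-- ===== PORT B =====
-- B-side helper: the inner "v = 2 * v + (ch == '1')" loop of Source B
def pvVal (c : List Char) : Nat := c.foldl (fun v ch => 2 * v + (if ch == '1' then 1 else 0)) 0

-- same tobin and generation order, but no per-string list scans: every binary code of
-- length k blocks, at level l, exactly the index range [v << (l-k), (v+1) << (l-k)); that
-- Python range(a, b) of nonnegative ints is List.range' a (b - a) with b - a = 2^(l-k), and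
-- blocked.update(...) is PySem.Set.update; 'i not in blocked' is the negated Set.contains.
def get_probables_alt (S : String) : List String :=
  let codes := (PySem.Str.split₀ S).map String.toList
  match PySem.List.max? codes (fun c => c.length) with
  | none => []  -- Python: max() raises ValueError on empty codes; excluded by Pre_
  | some m =>
    let bincodes := codes.foldl (fun acc c =>
        if !c.isEmpty && c.all (fun ch => ch == '0' || ch == '1') then
          acc ++ [(c.length, pvVal c)]
        else acc) ([] : List (Nat × Nat))
    let res :=
      (List.range m.length).foldl (fun res l0 =>
        let blocked := bincodes.foldl (fun bs kv =>
            if kv.1 ≤ l0 + 1 then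
              PySem.Set.update bs (List.range' (kv.2 * 2 ^ (l0 + 1 - kv.1)) (2 ^ (l0 + 1 - kv.1)))
            else bs) ([] : PySem.Set Nat)
        (List.range (2 ^ (l0 + 1))).foldl (fun res i =>
          if PySem.Set.contains blocked i then res
          else res ++ [pvTobin i (l0 + 1)]) res)
        ([] : List (List Char))
    res.map String.ofList

-- ===== PRECONDITION & SPEC =====
-- Pre_ excludes exactly the inputs with no whitespace-separated token (S.split() == []),
-- on which Python's max(codes, key=len) raises ValueError in both A and B.
def Pre_get_probables (S : String) : Prop := PySem.Str.split₀ S ≠ []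
instance (S : String) : Decidable (Pre_get_probables S) := by unfold Pre_get_probables; infer_instance
def pvWitness_get_probables : String := "0 10"

def Spec_get_probables (S : String) (out : List String) : Prop := out = get_probables_alt S
instance (S : String) (out : List String) : Decidable (Spec_get_probables S out) := by unfold Spec_get_probables; infer_instance

-- ===== CLAIM (what is proved, stated in full; the proofs are below) =====
def Claim_equal_get_probables : Prop := ∀ (S : String), Dom_get_probables S → Pre_get_probables S → Spec_get_probables S (get_probables S)

-- ===== LEMMAS AND PROOFS =====

-- binary digits of n, most significant first: the value of bin(n)[2:]
def pvBinAux (n : Nat) : List Char :=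
  if _h : n < 2 then [Nat.digitChar n] else pvBinAux (n / 2) ++ [Nat.digitChar (n % 2)]
  decreasing_by exact Nat.div_lt_self (by omega) (by omega)

theorem pvToDigitsCore_eq (f : Nat) : ∀ n l, n < f → Nat.toDigitsCore 2 f n l = pvBinAux n ++ l := by
  induction f with
  | zero => intro n l h; omega
  | succ f ih =>
    intro n l h
    rw [Nat.toDigitsCore]
    by_cases h2 : n / 2 = 0
    · have hn : n < 2 := by
        rcases Nat.lt_or_ge n 2 with h' | h'
        · exact h'
        · exact absurd h2 (by have := Nat.one_le_div_iff (by omega : 0 < 2) |>.mpr h'; omega)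
      rw [if_pos h2, pvBinAux, dif_pos hn, Nat.mod_eq_of_lt hn]
      rfl
    · have hn : ¬ n < 2 := fun hlt => h2 (Nat.div_eq_of_lt hlt)
      have hlt : n / 2 < f := by
        have := Nat.div_lt_self (by omega : 0 < n) (by omega : 1 < 2)
        omega
      rw [if_neg h2, ih (n / 2) _ hlt]
      conv_rhs => rw [pvBinAux]
      rw [dif_neg hn]
      simp

theorem toBinChars_eq (n : Nat) : PySem.Int.toBinChars (n : Int) = pvBinAux n := by
  have h0 : ¬ ((n : Int) < 0) := by omega
  rw [PySem.Int.toBinChars, if_neg h0, Int.toNat_natCast, Nat.toDigits,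
      pvToDigitsCore_eq (n + 1) n [] (by omega), List.append_nil]

-- the l bits of i, most significant first
def pvBits : Nat → Nat → List Char
  | 0, _ => []
  | l + 1, i => pvBits l (i / 2) ++ [if i % 2 = 1 then '1' else '0']

theorem length_pvBits (l : Nat) : ∀ i, (pvBits l i).length = l := by
  induction l with
  | zero => intro i; rfl
  | succ l ih => intro i; simp [pvBits, ih]

theorem pvBits_zero (l : Nat) : pvBits l 0 = List.replicate l '0' := by
  induction l with
  | zero => rfl
  | succ l ih => simp [pvBits, ih, List.replicate_succ']

theorem digitChar_mod_two (i : Nat) :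
    Nat.digitChar (i % 2) = if i % 2 = 1 then '1' else '0' := by
  rcases Nat.mod_two_eq_zero_or_one i with h | h <;> rw [h] <;> rfl

theorem pvTobin_eq_pvBits : ∀ l i, i < 2 ^ (l + 1) → pvTobin i (l + 1) = pvBits (l + 1) i := by
  intro l
  induction l with
  | zero =>
    intro i hi
    interval_cases i <;> decide
  | succ l ih =>
    intro i hi
    show List.replicate (l + 2 - (PySem.Int.toBinChars (i : Int)).length) '0' ++
        PySem.Int.toBinChars (i : Int) = _
    rw [toBinChars_eq]
    by_cases h2 : i < 2
    · rw [pvBinAux, dif_pos h2]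
      have hdiv : i / 2 = 0 := Nat.div_eq_of_lt h2
      have hmod : i % 2 = i := Nat.mod_eq_of_lt h2
      show List.replicate (l + 2 - 1) '0' ++ [Nat.digitChar i] = pvBits (l + 2) i
      rw [show pvBits (l + 2) i = pvBits (l + 1) (i / 2) ++ [if i % 2 = 1 then '1' else '0'] from rfl,
          hdiv, pvBits_zero, hmod]
      rw [show Nat.digitChar i = if i = 1 then '1' else '0' by
        interval_cases i <;> rfl]
      rfl
    · rw [pvBinAux, dif_neg h2]
      have hq : i / 2 < 2 ^ (l + 1) := by
        apply Nat.div_lt_of_lt_mul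
        rw [← pow_succ']
        exact hi
      have hIH := ih (i / 2) hq
      rw [show pvBits (l + 2) i = pvBits (l + 1) (i / 2) ++ [if i % 2 = 1 then '1' else '0'] from rfl,
          ← hIH]
      rw [List.length_append, List.length_singleton]
      rw [show pvTobin (i / 2) (l + 1) =
          List.replicate (l + 1 - (pvBinAux (i / 2)).length) '0' ++ pvBinAux (i / 2) by
        show List.replicate (l + 1 - (PySem.Int.toBinChars ((i / 2 : Nat) : Int)).length) '0' ++
            PySem.Int.toBinChars ((i / 2 : Nat) : Int) = _
        rw [toBinChars_eq]]
      rw [digitChar_mod_two,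
          show l + 2 - ((pvBinAux (i / 2)).length + 1) = l + 1 - (pvBinAux (i / 2)).length from by
            omega]
      simp [List.append_assoc]

theorem length_pvTobin (l i : Nat) (h : i < 2 ^ (l + 1)) : (pvTobin i (l + 1)).length = l + 1 := by
  rw [pvTobin_eq_pvBits l i h]; exact length_pvBits _ _

theorem dropLast_pvTobin (l i : Nat) (h : i < 2 ^ (l + 1)) :
    (pvTobin i (l + 1)).dropLast = pvBits l (i / 2) := by
  rw [pvTobin_eq_pvBits l i h]
  exact List.dropLast_concat ..

-- "some prefix bn[:k], k = 1..len(bn), is a code"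
def pvHp (codes : List (List Char)) (bn : List Char) : Bool :=
  (List.range bn.length).any (fun k0 => codes.contains (bn.take (k0 + 1)))

theorem pvHp_concat (codes : List (List Char)) (ys : List Char) (c : Char) :
    pvHp codes (ys ++ [c]) = (pvHp codes ys || codes.contains (ys ++ [c])) := by
  unfold pvHp
  rw [List.length_append, List.length_singleton, List.range_succ, List.any_append]
  simp only [List.any_cons, List.any_nil, Bool.or_false]
  congr 1
  · apply PySem.List.any_congr_mem
    intro k hk
    rw [List.mem_range] at hk
    rw [List.take_append_of_le_length (by omega)]
  · rw [List.take_of_length_le (by simp)]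

-- all strings of length l, in generation order
def pvBns (l : Nat) : List (List Char) := (List.range (2 ^ l)).map (fun i => pvTobin i l)

-- A's blocked list after the first L levels, and the common result list
def pvBlk (codes : List (List Char)) (L : Nat) : List (List Char) :=
  (List.range L).flatMap (fun l0 => (pvBns (l0 + 1)).filter (pvHp codes))
def pvRes (codes : List (List Char)) (L : Nat) : List (List Char) :=
  (List.range L).flatMap (fun l0 => (pvBns (l0 + 1)).filter (fun bn => ! pvHp codes bn))

theorem pvBlk_succ (codes : List (List Char)) (L : Nat) :
    pvBlk codes (L + 1) = pvBlk codes L ++ (pvBns (L + 1)).filter (pvHp codes) := by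
  simp [pvBlk, List.range_succ]

theorem pvRes_succ (codes : List (List Char)) (L : Nat) :
    pvRes codes (L + 1) = pvRes codes L ++ (pvBns (L + 1)).filter (fun bn => ! pvHp codes bn) := by
  simp [pvRes, List.range_succ]

def pvCondA (codes blk : List (List Char)) (bn : List Char) : Bool :=
  codes.contains bn || blk.contains bn.dropLast

theorem contains_pvBlk (codes : List (List Char)) (L j : Nat) (hj : j < 2 ^ (L + 1)) :
    (pvBlk codes (L + 1)).contains (pvTobin j (L + 1)) = pvHp codes (pvTobin j (L + 1)) := by
  rw [List.contains_eq_mem]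
  by_cases h : pvHp codes (pvTobin j (L + 1)) = true
  · rw [h, decide_eq_true_eq]
    refine List.mem_flatMap.mpr ⟨L, List.mem_range.mpr (by omega), List.mem_filter.mpr ⟨?_, h⟩⟩
    exact List.mem_map.mpr ⟨j, List.mem_range.mpr hj, rfl⟩
  · have h' : pvHp codes (pvTobin j (L + 1)) = false := by
      revert h; cases pvHp codes (pvTobin j (L + 1)) <;> simp
    rw [h', decide_eq_false_iff_not]
    intro hmem
    rcases List.mem_flatMap.mp hmem with ⟨l0, _, hmemf⟩
    exact h (List.mem_filter.mp hmemf).2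

theorem pvCondA_eq_pvHp (codes : List (List Char)) (L i : Nat) (hi : i < 2 ^ (L + 1)) :
    pvCondA codes (pvBlk codes L) (pvTobin i (L + 1)) = pvHp codes (pvTobin i (L + 1)) := by
  have hdl := dropLast_pvTobin L i hi
  have hsplit : pvTobin i (L + 1) = pvBits L (i / 2) ++ [if i % 2 = 1 then '1' else '0'] := by
    rw [pvTobin_eq_pvBits L i hi]; rfl
  unfold pvCondA
  rw [hdl]
  cases L with
  | zero =>
    have hblk : pvBlk codes 0 = [] := rfl
    rw [hblk]
    conv_rhs => rw [hsplit, pvHp_concat, ← hsplit]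
    show (codes.contains (pvTobin i 1) || List.contains [] (pvBits 0 (i / 2))) = _
    rw [show pvBits 0 (i / 2) = [] from rfl]
    rw [show pvHp codes [] = false from rfl]
    simp [Bool.or_comm]
  | succ L' =>
    have hq : i / 2 < 2 ^ (L' + 1) := by
      apply Nat.div_lt_of_lt_mul
      rw [← pow_succ']
      exact hi
    have hb : pvBits (L' + 1) (i / 2) = pvTobin (i / 2) (L' + 1) :=
      (pvTobin_eq_pvBits L' (i / 2) hq).symm
    rw [hb, contains_pvBlk codes L' (i / 2) hq, ← hb]
    conv_rhs => rw [hsplit, pvHp_concat, ← hsplit]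
    exact Bool.or_comm _ _

theorem pvInnerA (codes blk : List (List Char)) (L : Nat) :
    ∀ (idxs : List Nat) (extra res : List (List Char)),
    (∀ x ∈ extra, x.length = L + 1) → (∀ i ∈ idxs, i < 2 ^ (L + 1)) →
    idxs.foldl (fun st i =>
        if codes.contains (pvTobin i (L + 1)) || st.1.contains (pvTobin i (L + 1)).dropLast then
          (st.1 ++ [pvTobin i (L + 1)], st.2)
        else (st.1, st.2 ++ [pvTobin i (L + 1)])) (blk ++ extra, res)
    = (blk ++ (extra ++ (idxs.map (fun i => pvTobin i (L + 1))).filter (pvCondA codes blk)),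
       res ++ (idxs.map (fun i => pvTobin i (L + 1))).filter (fun bn => ! pvCondA codes blk bn)) := by
  intro idxs
  induction idxs with
  | nil => intro extra res _ _; simp
  | cons i idxs ih =>
    intro extra res hext hidx
    have hi : i < 2 ^ (L + 1) := hidx i (by simp)
    have hextra : extra.contains (pvTobin i (L + 1)).dropLast = false := by
      rw [List.contains_eq_mem, decide_eq_false_iff_not]
      intro hmem
      have h1 := hext _ hmem
      have h2 : ((pvTobin i (L + 1)).dropLast).length = L := by
        rw [dropLast_pvTobin L i hi, length_pvBits]
      omega
    simp only [List.foldl_cons, List.map_cons, List.filter_cons]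
    have hcond : (codes.contains (pvTobin i (L + 1)) ||
        (blk ++ extra).contains (pvTobin i (L + 1)).dropLast)
        = pvCondA codes blk (pvTobin i (L + 1)) := by
      rw [List.contains_append, hextra, Bool.or_false]
      rfl
    rw [hcond]
    by_cases hc : pvCondA codes blk (pvTobin i (L + 1)) = true
    · rw [if_pos hc, List.append_assoc]
      rw [ih (extra ++ [pvTobin i (L + 1)]) res
          (by intro x hx
              rcases List.mem_append.mp hx with hx | hx
              · exact hext x hx
              · rcases List.mem_singleton.mp hx with rfl
                exact length_pvTobin L i hi)
          (fun j hj => hidx j (by simp [hj]))]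
      simp [hc, List.append_assoc]
    · have hc' : pvCondA codes blk (pvTobin i (L + 1)) = false := by
        revert hc; cases pvCondA codes blk (pvTobin i (L + 1)) <;> simp
      rw [if_neg hc]
      rw [ih extra (res ++ [pvTobin i (L + 1)]) hext (fun j hj => hidx j (by simp [hj]))]
      simp [hc', List.append_assoc]

theorem pvFoldl_skip_append {α β : Type} (q : α → Bool) (f : α → β) :
    ∀ (l : List α) (acc : List β),
    l.foldl (fun acc x => if q x then acc else acc ++ [f x]) acc
      = acc ++ (l.filter (fun x => ! q x)).map f := by
  intro l
  induction l with
  | nil => intro acc; simp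
  | cons x l ih =>
    intro acc
    simp only [List.foldl_cons, List.filter_cons]
    by_cases h : q x = true
    · rw [if_pos h, ih, h]
      rw [if_neg (by simp)]
    · have h' : q x = false := by revert h; cases q x <;> simp
      rw [if_neg h, ih, h']
      rw [if_pos (by simp : (!false) = true)]
      simp only [List.map_cons, List.append_assoc, List.singleton_append]

theorem pvMem_update (s : PySem.Set Nat) (xs : List Nat) (y : Nat) :
    y ∈ PySem.Set.update s xs ↔ y ∈ s ∨ y ∈ xs := by
  rw [PySem.Set.update_eq_append_filter]
  simp [PySem.Set.mem_ofList]
  tauto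

theorem pvMem_blockedFold (l : Nat) (i : Nat) :
    ∀ (bcs : List (Nat × Nat)) (s0 : PySem.Set Nat),
    (i ∈ bcs.foldl (fun bs kv =>
        if kv.1 ≤ l then
          PySem.Set.update bs (List.range' (kv.2 * 2 ^ (l - kv.1)) (2 ^ (l - kv.1)))
        else bs) s0)
    ↔ i ∈ s0 ∨ ∃ kv ∈ bcs, kv.1 ≤ l ∧ kv.2 * 2 ^ (l - kv.1) ≤ i ∧
        i < kv.2 * 2 ^ (l - kv.1) + 2 ^ (l - kv.1) := by
  intro bcs
  induction bcs with
  | nil => intro s0; simp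
  | cons kv bcs ih =>
    intro s0
    simp only [List.foldl_cons]
    rw [ih]
    by_cases h : kv.1 ≤ l
    · rw [if_pos h, pvMem_update, List.mem_range'_1]
      constructor
      · rintro ((hs | hr) | ⟨kv', hkv', hp⟩)
        · exact Or.inl hs
        · exact Or.inr ⟨kv, List.mem_cons_self .., h, hr.1, hr.2⟩
        · exact Or.inr ⟨kv', List.mem_cons_of_mem _ hkv', hp⟩
      · rintro (hs | ⟨kv', hkv', hp⟩)
        · exact Or.inl (Or.inl hs)
        · rcases List.mem_cons.mp hkv' with rfl | hkv'
          · exact Or.inl (Or.inr ⟨hp.2.1, hp.2.2⟩)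
          · exact Or.inr ⟨kv', hkv', hp⟩
    · rw [if_neg h]
      constructor
      · rintro (hs | ⟨kv', hkv', hp⟩)
        · exact Or.inl hs
        · exact Or.inr ⟨kv', List.mem_cons_of_mem _ hkv', hp⟩
      · rintro (hs | ⟨kv', hkv', hp⟩)
        · exact Or.inl hs
        · rcases List.mem_cons.mp hkv' with rfl | hkv'
          · exact absurd hp.1 h
          · exact Or.inr ⟨kv', hkv', hp⟩

theorem pvVal_concat (ys : List Char) (ch : Char) :
    pvVal (ys ++ [ch]) = 2 * pvVal ys + (if ch == '1' then 1 else 0) := by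
  simp [pvVal, List.foldl_append]

theorem pvVal_pvBits (k : Nat) : ∀ m, m < 2 ^ k → pvVal (pvBits k m) = m := by
  induction k with
  | zero => intro m hm; interval_cases m; rfl
  | succ k ih =>
    intro m hm
    show pvVal (pvBits k (m / 2) ++ [if m % 2 = 1 then '1' else '0']) = m
    rw [pvVal_concat, ih (m / 2) (by apply Nat.div_lt_of_lt_mul; rw [← pow_succ']; exact hm)]
    rcases Nat.mod_two_eq_zero_or_one m with h | h <;> rw [h] <;> simp <;> omega

theorem pvBits_pvVal : ∀ (c : List Char), (∀ ch ∈ c, ch = '0' ∨ ch = '1') →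
    pvBits c.length (pvVal c) = c := by
  intro c
  induction c using List.reverseRecOn with
  | nil => intro _; rfl
  | append_singleton ys ch ih =>
    intro hb
    rw [List.length_append, List.length_singleton, pvVal_concat]
    rcases hb ch (by simp) with rfl | rfl
    · rw [show (if ('0' : Char) == '1' then 1 else 0) = 0 from rfl]
      rw [show pvBits (ys.length + 1) (2 * pvVal ys + 0)
          = pvBits ys.length ((2 * pvVal ys + 0) / 2) ++
            [if (2 * pvVal ys + 0) % 2 = 1 then '1' else '0'] from rfl]
      rw [show (2 * pvVal ys + 0) / 2 = pvVal ys from by omega,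
          show (2 * pvVal ys + 0) % 2 = 0 from by omega]
      rw [ih (fun c hc => hb c (by simp [hc]))]
      simp
    · rw [show (if ('1' : Char) == '1' then 1 else 0) = 1 from rfl]
      rw [show pvBits (ys.length + 1) (2 * pvVal ys + 1)
          = pvBits ys.length ((2 * pvVal ys + 1) / 2) ++
            [if (2 * pvVal ys + 1) % 2 = 1 then '1' else '0'] from rfl]
      rw [show (2 * pvVal ys + 1) / 2 = pvVal ys from by omega,
          show (2 * pvVal ys + 1) % 2 = 1 from by omega]
      rw [ih (fun c hc => hb c (by simp [hc]))]
      simp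

theorem take_pvBits : ∀ (l k i : Nat), k ≤ l → (pvBits l i).take k = pvBits k (i / 2 ^ (l - k)) := by
  intro l
  induction l with
  | zero => intro k i hk; interval_cases k; rfl
  | succ l ih =>
    intro k i hk
    rcases Nat.lt_or_ge k (l + 1) with hlt | hge
    · have hk' : k ≤ l := by omega
      show (pvBits l (i / 2) ++ [if i % 2 = 1 then '1' else '0']).take k = _
      rw [List.take_append_of_le_length (by rw [length_pvBits]; omega)]
      rw [ih k (i / 2) hk', Nat.div_div_eq_div_mul]
      rw [show 2 * 2 ^ (l - k) = 2 ^ (l + 1 - k) from by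
        rw [← pow_succ']; congr 1; omega]
    · have hkk : k = l + 1 := by omega
      subst hkk
      rw [List.take_of_length_le (by simp [length_pvBits])]
      simp

theorem binary_pvBits : ∀ (l i : Nat) (ch : Char), ch ∈ pvBits l i → ch = '0' ∨ ch = '1' := by
  intro l
  induction l with
  | zero => intro i ch h; simp [pvBits] at h
  | succ l ih =>
    intro i ch h
    rw [show pvBits (l + 1) i
        = pvBits l (i / 2) ++ [if i % 2 = 1 then '1' else '0'] from rfl] at h
    rcases List.mem_append.mp h with h | h
    · exact ih (i / 2) ch h
    · rcases List.mem_singleton.mp h with rfl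
      split_ifs <;> simp

theorem pvBlocked_eq_pvHp (codes : List (List Char)) (L i : Nat) (hi : i < 2 ^ (L + 1)) :
    PySem.Set.contains
      ((codes.foldl (fun acc c =>
          if !c.isEmpty && c.all (fun ch => ch == '0' || ch == '1') then
            acc ++ [(c.length, pvVal c)]
          else acc) ([] : List (Nat × Nat))).foldl (fun bs kv =>
          if kv.1 ≤ L + 1 then
            PySem.Set.update bs (List.range' (kv.2 * 2 ^ (L + 1 - kv.1)) (2 ^ (L + 1 - kv.1)))
          else bs) ([] : PySem.Set Nat)) i
    = pvHp codes (pvTobin i (L + 1)) := by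
  have hpbits : pvTobin i (L + 1) = pvBits (L + 1) i := pvTobin_eq_pvBits L i hi
  rw [Bool.eq_iff_iff, PySem.Set.contains_iff, pvMem_blockedFold]
  rw [PySem.List.foldl_append_if
    (fun c => !c.isEmpty && c.all (fun ch => ch == '0' || ch == '1'))
    (fun c => (c.length, pvVal c)) codes [], List.nil_append]
  rw [show (pvHp codes (pvTobin i (L + 1)) = true)
      ↔ ∃ k0, k0 < L + 1 ∧ (pvBits (L + 1) i).take (k0 + 1) ∈ codes from by
    simp only [pvHp, List.any_eq_true, List.mem_range, List.contains_eq_mem,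
      decide_eq_true_eq, hpbits, length_pvBits]]
  constructor
  · rintro (h0 | ⟨kv, hkv, hkle, hlo, hup⟩)
    · simp at h0
    · rcases List.mem_map.mp hkv with ⟨c, hcf, rfl⟩
      rcases List.mem_filter.mp hcf with ⟨hc, hguard⟩
      rcases Bool.and_eq_true .. |>.mp hguard with ⟨hne, hall⟩
      have hclen : 1 ≤ c.length := by
        cases c with
        | nil => simp at hne
        | cons a t => simp
      have hbin : ∀ ch ∈ c, ch = '0' ∨ ch = '1' := by
        intro ch hch
        rcases Bool.or_eq_true .. |>.mp ((List.all_eq_true.mp hall) ch hch) with h | h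
        · exact Or.inl (eq_of_beq h)
        · exact Or.inr (eq_of_beq h)
      refine ⟨c.length - 1, by omega, ?_⟩
      rw [show c.length - 1 + 1 = c.length from by omega]
      rw [take_pvBits (L + 1) c.length i hkle]
      rw [show i / 2 ^ (L + 1 - c.length) = pvVal c from
        Nat.div_eq_of_lt_le hlo (by rw [Nat.add_mul, one_mul]; exact hup)]
      rw [pvBits_pvVal c hbin]
      exact hc
  · rintro ⟨k0, hk0, hmem⟩
    right
    have hd : 0 < 2 ^ (L + 1 - (k0 + 1)) := pow_pos (by omega) _
    have htake := take_pvBits (L + 1) (k0 + 1) i (by omega)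
    rw [htake] at hmem
    have hjlt : i / 2 ^ (L + 1 - (k0 + 1)) < 2 ^ (k0 + 1) := by
      rw [Nat.div_lt_iff_lt_mul hd, ← pow_add]
      rw [show k0 + 1 + (L + 1 - (k0 + 1)) = L + 1 from by omega]
      exact hi
    have hguard : (!(pvBits (k0 + 1) (i / 2 ^ (L + 1 - (k0 + 1)))).isEmpty &&
        (pvBits (k0 + 1) (i / 2 ^ (L + 1 - (k0 + 1)))).all
          (fun ch => ch == '0' || ch == '1')) = true := by
      apply (Bool.and_eq_true ..).mpr
      refine ⟨?_, ?_⟩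
      · have hl := length_pvBits (k0 + 1) (i / 2 ^ (L + 1 - (k0 + 1)))
        cases hcc : pvBits (k0 + 1) (i / 2 ^ (L + 1 - (k0 + 1))) with
        | nil => rw [hcc] at hl; simp at hl
        | cons a t => simp
      · apply List.all_eq_true.mpr
        intro ch hch
        rcases binary_pvBits (k0 + 1) (i / 2 ^ (L + 1 - (k0 + 1))) ch hch with rfl | rfl
        · rfl
        · simp
    refine ⟨((pvBits (k0 + 1) (i / 2 ^ (L + 1 - (k0 + 1)))).length,
        pvVal (pvBits (k0 + 1) (i / 2 ^ (L + 1 - (k0 + 1))))),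
      List.mem_map.mpr ⟨_, List.mem_filter.mpr ⟨hmem, hguard⟩, rfl⟩, ?_, ?_, ?_⟩
    · dsimp only
      simp only [length_pvBits]
      omega
    · dsimp only
      simp only [length_pvBits, pvVal_pvBits _ _ hjlt]
      exact Nat.div_mul_le_self i _
    · dsimp only
      simp only [length_pvBits, pvVal_pvBits _ _ hjlt]
      have h1 := Nat.div_add_mod i (2 ^ (L + 1 - (k0 + 1)))
      have h2 : i % 2 ^ (L + 1 - (k0 + 1)) < 2 ^ (L + 1 - (k0 + 1)) := Nat.mod_lt _ hd
      rw [mul_comm] at h1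
      omega

theorem pvOuterA (codes : List (List Char)) : ∀ L : Nat,
    (List.range L).foldl (fun st l0 =>
        (List.range (2 ^ (l0 + 1))).foldl (fun st i =>
          if codes.contains (pvTobin i (l0 + 1)) || st.1.contains (pvTobin i (l0 + 1)).dropLast then
            (st.1 ++ [pvTobin i (l0 + 1)], st.2)
          else (st.1, st.2 ++ [pvTobin i (l0 + 1)])) st)
      (([], []) : List (List Char) × List (List Char))
    = (pvBlk codes L, pvRes codes L) := by
  intro L
  induction L with
  | zero => rfl
  | succ L ih =>
    rw [List.range_succ, List.foldl_append, ih]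
    simp only [List.foldl_cons, List.foldl_nil]
    have h := pvInnerA codes (pvBlk codes L) L (List.range (2 ^ (L + 1))) [] (pvRes codes L)
      (by intro x hx; simp at hx)
      (by intro i hi; exact List.mem_range.mp hi)
    rw [List.append_nil, List.nil_append] at h
    rw [h]
    have hfA : ((List.range (2 ^ (L + 1))).map (fun i => pvTobin i (L + 1))).filter
        (pvCondA codes (pvBlk codes L)) = (pvBns (L + 1)).filter (pvHp codes) := by
      apply List.filter_congr
      intro x hx
      rcases List.mem_map.mp hx with ⟨i, hi, rfl⟩
      exact pvCondA_eq_pvHp codes L i (List.mem_range.mp hi)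
    have hfB : ((List.range (2 ^ (L + 1))).map (fun i => pvTobin i (L + 1))).filter
        (fun bn => ! pvCondA codes (pvBlk codes L) bn)
        = (pvBns (L + 1)).filter (fun bn => ! pvHp codes bn) := by
      apply List.filter_congr
      intro x hx
      rcases List.mem_map.mp hx with ⟨i, hi, rfl⟩
      rw [pvCondA_eq_pvHp codes L i (List.mem_range.mp hi)]
    rw [hfA, hfB, pvBlk_succ, pvRes_succ]

theorem pvOuterB (codes : List (List Char)) : ∀ L : Nat,
    (List.range L).foldl (fun res l0 =>
        (List.range (2 ^ (l0 + 1))).foldl (fun res i =>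
          if PySem.Set.contains
              ((codes.foldl (fun acc c =>
                  if !c.isEmpty && c.all (fun ch => ch == '0' || ch == '1') then
                    acc ++ [(c.length, pvVal c)]
                  else acc) ([] : List (Nat × Nat))).foldl (fun bs kv =>
                  if kv.1 ≤ l0 + 1 then
                    PySem.Set.update bs
                      (List.range' (kv.2 * 2 ^ (l0 + 1 - kv.1)) (2 ^ (l0 + 1 - kv.1)))
                  else bs) ([] : PySem.Set Nat)) i then res
          else res ++ [pvTobin i (l0 + 1)]) res)
      ([] : List (List Char))
    = pvRes codes L := by
  intro L
  induction L with
  | zero => rfl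
  | succ L ih =>
    rw [List.range_succ, List.foldl_append, ih]
    simp only [List.foldl_cons, List.foldl_nil]
    rw [pvFoldl_skip_append]
    rw [pvRes_succ, pvBns, List.filter_map]
    refine congrArg (fun t => pvRes codes L ++ t) ?_
    refine congrArg (List.map (fun i => pvTobin i (L + 1))) ?_
    apply List.filter_congr
    intro i hi
    simp only [Function.comp]
    rw [pvBlocked_eq_pvHp codes L i (List.mem_range.mp hi)]

-- ===== VERDICT (by name: the statement is the Claim_ definition above) =====
theorem get_probables_spec : Claim_equal_get_probables := by
  intro S _ hPre
  unfold Pre_get_probables at hPre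
  unfold Spec_get_probables get_probables get_probables_alt
  have hne : (PySem.Str.split₀ S).map String.toList ≠ [] := by
    intro h; exact hPre (List.map_eq_nil_iff.mp h)
  obtain ⟨m, hmax⟩ : ∃ m, PySem.List.max? ((PySem.Str.split₀ S).map String.toList)
      (fun c => c.length) = some m := by
    cases h : PySem.List.max? ((PySem.Str.split₀ S).map String.toList) (fun c => c.length) with
    | none => exact absurd ((PySem.List.max?_eq_none_iff _ _).mp h) hne
    | some m => exact ⟨m, rfl⟩
  simp only [hmax]
  rw [pvOuterA, pvOuterB]
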